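-- pv_equiv track=rewrite | github.com/zhao-zilong/gtv | Evaluation/model/synthesizer/ctabgan_synthesizer_backup.py | get_st_ed
-- ===== SOURCE A (Python) =====
-- def get_st_ed(target_col_index,problem_type,output_info):
--
--     st = 0
--     c= 0
--     tc= 0
--
--     for item in output_info:
--         if c==target_col_index:
--             break
--         if item[1]=='tanh':
--             st += item[0]
--             if item[2] == 'yes_g':
--                 c+=1
--         elif item[1] == 'softmax':
--             st += item[0]
--             c+=1
--         tc+=1
--
--     if problem_type == "Classification":
--         ed= st+output_info[tc][0]
--     else:
--         if output_info[tc][2] == "yes_g":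
--             ed = st+output_info[tc][0]
--         else: ed = st + (1+output_info[tc+1][0])
--
--     return (st,ed)
-- ===== SOURCE B (Python) =====
-- def get_st_ed(target_col_index, problem_type, output_info):
--     # Build a table of logical columns: for each column, the index of its
--     # first item and the cumulative width offset before it.
--     table = [(0, 0)]
--     offset = 0
--     for i, item in enumerate(output_info):
--         if item[1] == 'tanh':
--             offset += item[0]
--             if item[2] == 'yes_g':
--                 table.append((i + 1, offset))
--         elif item[1] == 'softmax':
--             offset += item[0]
--             table.append((i + 1, offset))
--     tc, st = table[target_col_index]
--     if problem_type == "Classification":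
--         ed = st + output_info[tc][0]
--     elif output_info[tc][2] == "yes_g":
--         ed = st + output_info[tc][0]
--     else:
--         ed = st + (1 + output_info[tc + 1][0])
--     return (st, ed)
-- ===== Notes on version B (the rewrite author's own statement) =====
-- stated objective: alternative
-- what changed: Replaces A's early-breaking scan with a two-phase decomposition: one full pass builds a table of (start item index, width offset) per logical column, then the target column is obtained by direct table indexing; Pre_ excludes only inputs on which A raises IndexError (out-of-range target column or the final lookup past the list end).
import Mathlib
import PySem

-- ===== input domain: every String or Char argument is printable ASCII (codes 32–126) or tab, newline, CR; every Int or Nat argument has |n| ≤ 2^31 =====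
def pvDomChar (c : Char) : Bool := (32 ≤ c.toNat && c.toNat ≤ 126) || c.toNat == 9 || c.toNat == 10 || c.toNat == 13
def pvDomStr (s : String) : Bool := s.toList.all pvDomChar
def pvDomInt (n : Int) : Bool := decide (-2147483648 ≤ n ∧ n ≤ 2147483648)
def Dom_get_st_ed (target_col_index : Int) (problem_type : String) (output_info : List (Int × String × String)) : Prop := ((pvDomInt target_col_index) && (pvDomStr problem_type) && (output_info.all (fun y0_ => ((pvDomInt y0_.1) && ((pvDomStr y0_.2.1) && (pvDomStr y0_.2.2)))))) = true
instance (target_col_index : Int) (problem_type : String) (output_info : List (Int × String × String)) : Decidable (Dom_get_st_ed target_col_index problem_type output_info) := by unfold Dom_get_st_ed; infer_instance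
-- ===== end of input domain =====

-- B changes the decomposition: one pass builds a column table (start index, offset), then the
-- target column is looked up by direct indexing; same cost as A, objective: alternative.
-- Pre_ excludes exactly the inputs on which the Python A raises IndexError.

-- item indexed with a possibly out-of-range index; default is only reached outside Pre_
def pvItem (xs : List (Int × String × String)) (i : Int) : Int × String × String :=
  (PySem.List.pyGet? xs i).getD (0, "", "")

-- ===== PORT A =====
-- A's scanning loop: state (st, c, tc), breaks when c == target
def pvLoopA (target : Int) : List (Int × String × String) → Int → Int → Int → Int × Int
  | [], st, _, tc => (st, tc)
  | item :: rest, st, c, tc =>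
    if c == target then (st, tc)
    else if item.2.1 == "tanh" then
      pvLoopA target rest (st + item.1) (if item.2.2 == "yes_g" then c + 1 else c) (tc + 1)
    else if item.2.1 == "softmax" then
      pvLoopA target rest (st + item.1) (c + 1) (tc + 1)
    else
      pvLoopA target rest st c (tc + 1)

def get_st_ed (target_col_index : Int) (problem_type : String) (output_info : List (Int × String × String)) : Int × Int :=
  let r := pvLoopA target_col_index output_info 0 0 0
  let st := r.1
  let tc := r.2
  let ed :=
    if problem_type == "Classification" then st + (pvItem output_info tc).1
    else if (pvItem output_info tc).2.2 == "yes_g" then st + (pvItem output_info tc).1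
    else st + (1 + (pvItem output_info (tc + 1)).1)
  (st, ed)

-- ===== PORT B =====
-- Pass 1 of Source B: the column table built in order (the leading (0,0) entry is consed on at the
-- use site); `i` is the enumerate counter, `offset` the running width offset.
def pvTabB : List (Int × String × String) → Int → Int → List (Int × Int)
  | [], _, _ => []
  | item :: rest, i, offset =>
    if item.2.1 == "tanh" then
      let o' := offset + item.1
      if item.2.2 == "yes_g" then (i + 1, o') :: pvTabB rest (i + 1) o'
      else pvTabB rest (i + 1) o'
    else if item.2.1 == "softmax" then
      let o' := offset + item.1
      (i + 1, o') :: pvTabB rest (i + 1) o'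
    else pvTabB rest (i + 1) offset

def get_st_ed_alt (target_col_index : Int) (problem_type : String) (output_info : List (Int × String × String)) : Int × Int :=
  let table : List (Int × Int) := (0, 0) :: pvTabB output_info 0 0
  let p := (PySem.List.pyGet? table target_col_index).getD (0, 0)  -- none only outside Pre_
  let tc := p.1
  let st := p.2
  let ed :=
    if problem_type == "Classification" then st + (pvItem output_info tc).1
    else if (pvItem output_info tc).2.2 == "yes_g" then st + (pvItem output_info tc).1
    else st + (1 + (pvItem output_info (tc + 1)).1)
  (st, ed)

-- ===== PRECONDITION & SPEC =====
-- first item index at which A's running column counter equals the target (list length if never)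
def pvBreakIdx (t : Int) : List (Int × String × String) → Nat
  | [] => 0
  | item :: rest =>
    if t = 0 then 0
    else 1 + pvBreakIdx (if item.2.1 == "softmax" || (item.2.1 == "tanh" && item.2.2 == "yes_g") then t - 1 else t) rest

-- exactly the inputs on which the Python A returns (no IndexError from output_info[tc]/[tc+1])
def Pre_get_st_ed (target_col_index : Int) (problem_type : String) (output_info : List (Int × String × String)) : Prop :=
  pvBreakIdx target_col_index output_info < output_info.length ∧
  (problem_type = "Classification" ∨
   (output_info.getD (pvBreakIdx target_col_index output_info) (0, "", "")).2.2 = "yes_g" ∨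
   pvBreakIdx target_col_index output_info + 1 < output_info.length)

instance (target_col_index : Int) (problem_type : String) (output_info : List (Int × String × String)) : Decidable (Pre_get_st_ed target_col_index problem_type output_info) := by unfold Pre_get_st_ed; infer_instance

def pvWitness_get_st_ed : Int × String × (List (Int × String × String)) :=
  (1, "Classification", [(2, "tanh", "no_g"), (3, "softmax", ""), (4, "softmax", "")])

def Spec_get_st_ed (target_col_index : Int) (problem_type : String) (output_info : List (Int × String × String)) (out : Int × Int) : Prop := out = get_st_ed_alt target_col_index problem_type output_info
instance (target_col_index : Int) (problem_type : String) (output_info : List (Int × String × String)) (out : Int × Int) : Decidable (Spec_get_st_ed target_col_index problem_type output_info out) := by unfold Spec_get_st_ed; infer_instance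

-- ===== CLAIM (what is proved, stated in full; the proofs are below) =====
def Claim_equal_get_st_ed : Prop := ∀ (target_col_index : Int) (problem_type : String) (output_info : List (Int × String × String)), Dom_get_st_ed target_col_index problem_type output_info → Pre_get_st_ed target_col_index problem_type output_info → Spec_get_st_ed target_col_index problem_type output_info (get_st_ed target_col_index problem_type output_info)

-- ===== LEMMAS AND PROOFS =====

-- total offset accumulated by A's loop when it never breaks (used only to state loopA_eq_tab)
def pvTot : List (Int × String × String) → Int → Int
  | [], st => st
  | item :: rest, st =>
    if item.2.1 == "tanh" || item.2.1 == "softmax" then pvTot rest (st + item.1)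
    else pvTot rest st

-- A's loop related to B's table: starting from counter c, A breaks at the (t-c)-th table entry
-- (counted from the current state), or runs to the end.
theorem loopA_eq_tab (xs : List (Int × String × String)) :
    ∀ (st tc c t : Int),
      pvLoopA t xs st c tc =
        (if c = t then (st, tc)
         else if c < t then
           match (pvTabB xs tc st)[(t - c - 1).toNat]? with
           | some p => (p.2, p.1)
           | none => (pvTot xs st, tc + xs.length)
         else (pvTot xs st, tc + xs.length)) := by
  induction xs with
  | nil =>
    intro st tc c t
    simp [pvLoopA, pvTabB, pvTot]
  | cons item rest ih =>
    intro st tc c t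
    by_cases hct : c = t
    · simp [pvLoopA, hct]
    · have hne : (c == t) = false := by simp [hct]
      have hL : tc + (((item :: rest).length : Nat) : Int) = tc + 1 + (rest.length : Int) := by
        simp only [List.length_cons]; push_cast; omega
      simp only [pvLoopA, hne, Bool.false_eq_true, if_false]
      by_cases hlt : c < t
      · have key : ∀ (st' : Int),
            (if c + 1 = t then (st', tc + 1)
             else if c + 1 < t then
               match (pvTabB rest (tc+1) st')[(t - (c+1) - 1).toNat]? with
               | some p => (p.2, p.1)
               | none => (pvTot rest st', tc + 1 + (rest.length : Int))
             else (pvTot rest st', tc + 1 + (rest.length : Int))) =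
            (match ((tc + 1, st') :: pvTabB rest (tc+1) st')[(t - c - 1).toNat]? with
             | some p => (p.2, p.1)
             | none => (pvTot rest st', tc + 1 + (rest.length : Int))) := by
          intro st'
          by_cases h1 : c + 1 = t
          · have h0 : (t - c - 1).toNat = 0 := by omega
            simp [← h1]
          · have h2 : c + 1 < t := by omega
            have hpos : (t - c - 1).toNat = (t - (c+1) - 1).toNat + 1 := by omega
            simp [hpos, h1, h2]
        by_cases ht1 : item.2.1 == "tanh"
        · by_cases ht2 : item.2.2 == "yes_g"
          · simp only [ht1, ht2, if_true]
            rw [ih, key (st + item.1), if_neg hct, if_pos hlt]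
            simp only [pvTabB, pvTot, ht1, ht2, if_true, Bool.true_or]
            rw [hL]
          · simp only [ht1, ht2, Bool.false_eq_true, if_false, if_true]
            rw [ih, if_neg hct, if_pos hlt, if_neg hct, if_pos hlt]
            simp only [pvTabB, pvTot, ht1, ht2, Bool.false_eq_true, if_false, if_true, Bool.true_or]
            rw [hL]
        · by_cases ht3 : item.2.1 == "softmax"
          · simp only [ht1, ht3, Bool.false_eq_true, if_false, if_true]
            rw [ih, key (st + item.1), if_neg hct, if_pos hlt]
            simp only [pvTabB, pvTot, ht1, ht3, Bool.false_eq_true, if_false, if_true, Bool.false_or]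
            rw [hL]
          · simp only [ht1, ht3, Bool.false_eq_true, if_false]
            rw [ih, if_neg hct, if_pos hlt, if_neg hct, if_pos hlt]
            simp only [pvTabB, pvTot, ht1, ht3, Bool.false_eq_true, if_false, Bool.false_or]
            rw [hL]
      · have h1 : ¬ (c + 1 = t) := by omega
        have h2 : ¬ (c + 1 < t) := by omega
        by_cases ht1 : item.2.1 == "tanh"
        · by_cases ht2 : item.2.2 == "yes_g"
          · simp only [ht1, ht2, if_true]
            rw [ih, if_neg h1, if_neg h2, if_neg hct, if_neg hlt]
            simp only [pvTot, ht1, Bool.true_or, if_true]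
            rw [hL]
          · simp only [ht1, ht2, Bool.false_eq_true, if_false, if_true]
            rw [ih, if_neg hct, if_neg hlt, if_neg hct, if_neg hlt]
            simp only [pvTot, ht1, Bool.true_or, if_true]
            rw [hL]
        · by_cases ht3 : item.2.1 == "softmax"
          · simp only [ht1, ht3, Bool.false_eq_true, if_false, if_true]
            rw [ih, if_neg h1, if_neg h2, if_neg hct, if_neg hlt]
            simp only [pvTot, ht1, ht3, Bool.false_or, if_true]
            rw [hL]
          · simp only [ht1, ht3, Bool.false_eq_true, if_false]
            rw [ih, if_neg hct, if_neg hlt, if_neg hct, if_neg hlt]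
            simp only [pvTot, ht1, ht3, Bool.false_eq_true, if_false, Bool.false_or]
            rw [hL]

-- a negative target never matches A's counter: the loop runs to the end
theorem breakIdx_neg (xs : List (Int × String × String)) :
    ∀ t : Int, t < 0 → pvBreakIdx t xs = xs.length := by
  induction xs with
  | nil => intro t _; rfl
  | cons item rest ih =>
    intro t ht
    have hne : ¬ (t = 0) := by omega
    simp only [pvBreakIdx, hne, if_false, List.length_cons]
    split_ifs <;> rw [ih _ (by omega)] <;> omega

-- when A's loop breaks on a positive target, B's table has an entry at index t-1
theorem breakIdx_pos (xs : List (Int × String × String)) :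
    ∀ (t i st : Int), 0 < t → pvBreakIdx t xs < xs.length →
      (t - 1).toNat < (pvTabB xs i st).length := by
  induction xs with
  | nil => intro t i st _ h; simp [pvBreakIdx] at h
  | cons item rest ih =>
    intro t i st ht h
    have hne : ¬ (t = 0) := by omega
    simp only [pvBreakIdx, hne, if_false, List.length_cons] at h
    have h' : pvBreakIdx (if item.2.1 == "softmax" || (item.2.1 == "tanh" && item.2.2 == "yes_g") then t - 1 else t) rest < rest.length := by omega
    by_cases hc : (item.2.1 == "softmax" || (item.2.1 == "tanh" && item.2.2 == "yes_g")) = true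
    · rw [if_pos hc] at h'
      by_cases ht1 : t = 1
      · subst ht1
        have : 0 < (pvTabB (item :: rest) i st).length := by
          simp only [pvTabB]
          rcases Bool.or_eq_true_iff.mp hc with hs | htn
          · by_cases htan : item.2.1 == "tanh"
            · simp at hs htan; rw [htan] at hs; simp at hs
            · simp [htan, hs]
          · have h1 := (Bool.and_eq_true_iff.mp htn).1
            have h2 := (Bool.and_eq_true_iff.mp htn).2
            simp [h1, h2]
        omega
      · have ht2 : 0 < t - 1 := by omega
        have := ih (t - 1) (i + 1) (st + item.1) ht2 h'
        have := ih (t - 1) (i + 1) st ht2 h'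
        have hcast : (t - 1 - 1).toNat + 1 = (t - 1).toNat := by omega
        simp only [pvTabB]
        rcases Bool.or_eq_true_iff.mp hc with hs | htn
        · by_cases htan : item.2.1 == "tanh"
          · simp at hs htan; rw [htan] at hs; simp at hs
          · simp only [htan, Bool.false_eq_true, if_false, hs, if_true, List.length_cons]
            have := ih (t - 1) (i + 1) (st + item.1) ht2 h'
            omega
        · have h1 := (Bool.and_eq_true_iff.mp htn).1
          have h2 := (Bool.and_eq_true_iff.mp htn).2
          simp only [h1, h2, if_true, List.length_cons]
          have := ih (t - 1) (i + 1) (st + item.1) ht2 h'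
          omega
    · rw [if_neg hc] at h'
      have hor := hc
      simp only [pvTabB]
      by_cases htan : item.2.1 == "tanh"
      · have hyg : (item.2.2 == "yes_g") = false := by
          by_contra hy
          exact hc (by simp_all)
        simp only [htan, if_true, hyg, Bool.false_eq_true, if_false]
        exact ih t (i + 1) (st + item.1) ht h'
      · have hsm : (item.2.1 == "softmax") = false := by
          by_contra hy
          exact hc (by simp_all)
        simp only [htan, hsm, Bool.false_eq_true, if_false]
        exact ih t (i + 1) st ht h'

-- under Pre_'s first conjunct, A's loop result equals B's table lookup
theorem sel_eq (t : Int) (xs : List (Int × String × String))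
    (hpre : pvBreakIdx t xs < xs.length) :
    pvLoopA t xs 0 0 0 =
      (let p := (PySem.List.pyGet? ((0, 0) :: pvTabB xs 0 0 : List (Int × Int)) t).getD (0, 0)
       (p.2, p.1)) := by
  rw [loopA_eq_tab]
  dsimp only
  by_cases h0 : (0 : Int) = t
  · simp [← h0, PySem.List.pyGet?, PySem.List.pyIdx?]
  · rw [if_neg h0]
    by_cases hlt : (0:Int) < t
    · rw [if_pos hlt]
      have hlen := breakIdx_pos xs t 0 0 hlt hpre
      have hidx : (t - 0 - 1).toNat = (t - 1).toNat := by omega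
      rw [hidx]
      have hsome : (pvTabB xs 0 0)[(t-1).toNat]? = some ((pvTabB xs 0 0)[(t-1).toNat]'hlen) :=
        List.getElem?_eq_getElem hlen
      rw [hsome]
      have hget : PySem.List.pyGet? ((0, 0) :: pvTabB xs 0 0 : List (Int × Int)) t = some ((pvTabB xs 0 0)[(t-1).toNat]'hlen) := by
        rw [PySem.List.pyGet?_of_nonneg _ (by omega)]
        have ht : t.toNat = (t - 1).toNat + 1 := by omega
        rw [ht, List.getElem?_cons_succ]
        exact List.getElem?_eq_getElem hlen
      rw [hget]
      rfl
    · exfalso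
      have hneg : t < 0 := by omega
      rw [breakIdx_neg xs t hneg] at hpre
      omega

-- ===== VERDICT (by name: the statement is the Claim_ definition above) =====
theorem get_st_ed_spec : Claim_equal_get_st_ed := by
  intro t pt xs _ hpre
  unfold Spec_get_st_ed get_st_ed get_st_ed_alt
  rw [sel_eq t xs hpre.1]
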